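-- pv_equiv track=rewrite | github.com/s1tkeyz/mai8_study | da/lab_04/src/main.py | calc_strong_suf
-- ===== SOURCE A (Python) =====
-- def calc_strong_suf(pat):
--     strong_suf = [None for _ in range(len(pat))]
--     pat = ''.join(reversed(pat))
--     z = [0 for _ in range(len(pat))]
--     l, r = 0, 1
--     for i in range(1, len(pat)):
--         if i < r:
--             z[i] = min(z[i - l], r - i)
--         while i + z[i] < len(pat) and pat[i + z[i]] == pat[z[i]]:
--             z[i] += 1
--         if i + z[i] > r:
--             l, r = i, i + z[i]
--         if strong_suf[z[i]] is None: strong_suf[z[i]] = i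
--     return strong_suf
-- ===== SOURCE B (Python) =====
-- def calc_strong_suf(pat):
--     p = pat[::-1]
--     n = len(p)
--     strong_suf = [None] * n
--     for i in range(1, n):
--         j = 0
--         while i + j < n and p[i + j] == p[j]:
--             j += 1
--         if strong_suf[j] is None:
--             strong_suf[j] = i
--     return strong_suf
-- ===== Notes on version B (the rewrite author's own statement) =====
-- stated objective: simpler
-- what changed: Drops the Z-algorithm's (l,r) window state, the min() shortcut and the whole z array: each Z-value is computed by a direct naive common-prefix scan and written straight into strong_suf.
import Mathlib
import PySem

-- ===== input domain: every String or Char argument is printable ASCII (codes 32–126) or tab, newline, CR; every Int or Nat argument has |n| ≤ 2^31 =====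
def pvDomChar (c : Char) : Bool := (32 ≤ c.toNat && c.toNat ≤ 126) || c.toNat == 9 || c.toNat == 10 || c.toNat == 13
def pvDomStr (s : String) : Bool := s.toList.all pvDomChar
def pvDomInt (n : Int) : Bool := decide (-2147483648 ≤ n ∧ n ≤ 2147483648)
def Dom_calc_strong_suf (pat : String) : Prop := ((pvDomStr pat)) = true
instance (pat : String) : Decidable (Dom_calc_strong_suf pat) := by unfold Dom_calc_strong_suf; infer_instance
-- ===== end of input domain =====

-- B replaces A's windowed Z-algorithm by a plain naive common-prefix scan per position (simpler, no z array and no (l,r) state); same return value proved for all strings.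

-- ===== PORT A =====
-- A's inner while loop: `while i + z[i] < n and pat[i+z[i]] == pat[z[i]]: z[i] += 1`
-- (getD is exact here: the `i + j < n` guard keeps every index in range; j ≤ i + j)
def zExtend (p : List Char) (i : Nat) (j : Nat) : Nat :=
  if h : i + j < p.length ∧ p.getD (i + j) ' ' = p.getD j ' ' then zExtend p i (j + 1) else j
termination_by p.length - j
decreasing_by have := h.1; omega

def calc_strong_suf (pat : String) : List (Option Int) :=
  let ss0 : List (Option Int) := List.replicate pat.toList.length none  -- [None]*len(pat)
  let p : List Char := pat.toList.reverse                               -- ''.join(reversed(pat))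
  let z0 : List Nat := List.replicate p.length 0                        -- [0]*len(pat)
  let st := (List.range' 1 (p.length - 1)).foldl                        -- for i in range(1, len(pat))
    (fun (st : List Nat × Nat × Nat × List (Option Int)) (i : Nat) =>
      let z := st.1
      let l := st.2.1
      let r := st.2.2.1
      let ss := st.2.2.2
      let z1 := if i < r then z.set i (min (z.getD (i - l) 0) (r - i)) else z
      let zi := zExtend p i (z1.getD i 0)
      let z2 := z1.set i zi
      let lr := if r < i + zi then (i, i + zi) else (l, r)               -- if i+z[i] > r
      let ss' := if ss.getD zi none = none then ss.set zi (some (i : Int)) else ss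
      (z2, lr.1, lr.2, ss'))
    (z0, 0, 1, ss0)
  st.2.2.2

-- ===== PORT B =====
-- B's inner while loop: `while i + j < n and p[i+j] == p[j]: j += 1` (same range argument as above)
def matchLen (p : List Char) (i : Nat) (j : Nat) : Nat :=
  if h : i + j < p.length ∧ p.getD (i + j) ' ' = p.getD j ' ' then matchLen p i (j + 1) else j
termination_by p.length - j
decreasing_by have := h.1; omega

def calc_strong_suf_alt (pat : String) : List (Option Int) :=
  let p : List Char := pat.toList.reverse
  (List.range' 1 (p.length - 1)).foldl
    (fun (ss : List (Option Int)) (i : Nat) =>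
      let j := matchLen p i 0
      if ss.getD j none = none then ss.set j (some (i : Int)) else ss)
    (List.replicate p.length none)

-- ===== PRECONDITION & SPEC =====
def Spec_calc_strong_suf (pat : String) (out : List (Option Int)) : Prop := out = calc_strong_suf_alt pat
instance (pat : String) (out : List (Option Int)) : Decidable (Spec_calc_strong_suf pat out) := by unfold Spec_calc_strong_suf; infer_instance

-- ===== CLAIM (what is proved, stated in full; the proofs are below) =====
def Claim_equal_calc_strong_suf : Prop := ∀ (pat : String), Dom_calc_strong_suf pat → Spec_calc_strong_suf pat (calc_strong_suf pat)

-- ===== LEMMAS AND PROOFS =====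

theorem getD_set_self {α : Type} (l : List α) (i : Nat) (h : i < l.length) (a d : α) :
    (l.set i a).getD i d = a := by
  simp [List.getD_eq_getElem?_getD, h]

theorem getD_set_ne {α : Type} (l : List α) (i j : Nat) (h : i ≠ j) (a d : α) :
    (l.set i a).getD j d = l.getD j d := by
  simp [List.getD_eq_getElem?_getD, List.getElem?_set_ne h]

theorem getD_replicate {α : Type} (n t : Nat) (d : α) : (List.replicate n d).getD t d = d := by
  simp [List.getD_eq_getElem?_getD, List.getElem?_replicate]; split <;> rfl

theorem zExtend_eq (p : List Char) (i j : Nat) : zExtend p i j = matchLen p i j := by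
  fun_induction zExtend p i j with
  | case1 j h ih => rw [matchLen, dif_pos h]; exact ih
  | case2 j h => rw [matchLen, dif_neg h]

theorem matchLen_le (p : List Char) (i j : Nat) (h : i + j ≤ p.length) :
    i + matchLen p i j ≤ p.length := by
  fun_induction matchLen p i j with
  | case1 j h' ih => exact ih (by omega)
  | case2 j h' => exact h

theorem matchLen_matches (p : List Char) (i j : Nat) :
    ∀ t, j ≤ t → t < matchLen p i j →
      i + t < p.length ∧ p.getD (i + t) ' ' = p.getD t ' ' := by
  fun_induction matchLen p i j with
  | case1 j h ih =>
    intro t ht hlt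
    rcases Nat.eq_or_lt_of_le ht with rfl | ht'
    · exact h
    · exact ih t ht' hlt
  | case2 j h =>
    intro t ht hlt; omega


theorem matchLen_eq_of_matches (p : List Char) (i : Nat) :
    ∀ j, (∀ t, t < j → i + t < p.length ∧ p.getD (i + t) ' ' = p.getD t ' ') →
      matchLen p i j = matchLen p i 0 := by
  intro j
  induction j with
  | zero => intro _; rfl
  | succ j ih =>
    intro h
    have hj := h j (by omega)
    have h1 : matchLen p i j = matchLen p i (j + 1) := by
      rw [matchLen, dif_pos hj]
    rw [← h1]
    exact ih (fun t ht => h t (by omega))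


-- the fold bodies of the two ports, named for the proofs
def Astep (p : List Char) (st : List Nat × Nat × Nat × List (Option Int)) (i : Nat) :
    List Nat × Nat × Nat × List (Option Int) :=
  let z := st.1
  let l := st.2.1
  let r := st.2.2.1
  let ss := st.2.2.2
  let z1 := if i < r then z.set i (min (z.getD (i - l) 0) (r - i)) else z
  let zi := zExtend p i (z1.getD i 0)
  let z2 := z1.set i zi
  let lr := if r < i + zi then (i, i + zi) else (l, r)
  let ss' := if ss.getD zi none = none then ss.set zi (some (i : Int)) else ss
  (z2, lr.1, lr.2, ss')

def Bstep (p : List Char) (ss : List (Option Int)) (i : Nat) : List (Option Int) :=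
  let j := matchLen p i 0
  if ss.getD j none = none then ss.set j (some (i : Int)) else ss

def Bfold (p : List Char) (k : Nat) : List (Option Int) :=
  (List.range' 1 k).foldl (Bstep p) (List.replicate p.length none)

theorem Bfold_succ (p : List Char) (k : Nat) :
    Bfold p (k + 1) = Bstep p (Bfold p k) (k + 1) := by
  unfold Bfold
  rw [List.range'_concat, List.foldl_append]
  simp [Nat.add_comm]

def AInit (p : List Char) : List Nat × Nat × Nat × List (Option Int) :=
  (List.replicate p.length 0, 0, 1, List.replicate p.length none)

def ZInv (p : List Char) (k : Nat) (st : List Nat × Nat × Nat × List (Option Int)) : Prop :=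
  st.1.length = p.length ∧
  (∀ t, 1 ≤ t → t ≤ k → st.1.getD t 0 = matchLen p t 0) ∧
  (∀ t, k < t → st.1.getD t 0 = 0) ∧
  st.2.1 ≤ k ∧ st.2.1 ≤ st.2.2.1 ∧ st.2.2.1 ≤ p.length ∧
  ((st.2.1 = 0 ∧ st.2.2.1 = 1) ∨ (1 ≤ st.2.1 ∧ st.2.2.1 = st.2.1 + matchLen p st.2.1 0)) ∧
  st.2.2.2 = Bfold p k

theorem ZInv_init (p : List Char) (hn : 1 ≤ p.length) : ZInv p 0 (AInit p) := by
  refine ⟨by simp [AInit], ?_, ?_, by simp [AInit], by simp [AInit], ?_, ?_, ?_⟩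
  · intro t h1 h2; omega
  · intro t _; exact getD_replicate _ _ _
  · simpa [AInit] using hn
  · left; exact ⟨rfl, rfl⟩
  · rfl

theorem ZInv_step (p : List Char) (k : Nat) (st : List Nat × Nat × Nat × List (Option Int))
    (hn : k + 1 < p.length) (h : ZInv p k st) : ZInv p (k + 1) (Astep p st (k + 1)) := by
  obtain ⟨z, l, r, ss⟩ := st
  obtain ⟨hzlen, hzval, hz0, hlk, hlr, hrn, hwin, hss⟩ := h
  try dsimp only at hzlen hzval hz0 hlk hlr hrn hwin hss
  set i := k + 1 with hi
  -- step 1: the computed z-value is the true longest common prefix length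
  have hZ : zExtend p i ((if i < r then z.set i (min (z.getD (i - l) 0) (r - i)) else z).getD i 0)
      = matchLen p i 0 := by
    by_cases hir : i < r
    · rw [if_pos hir]
      have hwin' : 1 ≤ l ∧ r = l + matchLen p l 0 := by
        rcases hwin with ⟨h0, h1⟩ | hw
        · omega
        · exact hw
      have hli : l < i := by omega
      have hz_il : z.getD (i - l) 0 = matchLen p (i - l) 0 := hzval _ (by omega) (by omega)
      have hW : ∀ t, t < r - l → p.getD (l + t) ' ' = p.getD t ' ' := by
        intro t ht
        exact (matchLen_matches p l 0 t (Nat.zero_le _) (by omega)).2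
      have hgd : (z.set i (min (z.getD (i - l) 0) (r - i))).getD i 0
          = min (matchLen p (i - l) 0) (r - i) := by
        rw [getD_set_self _ _ (by omega) _ _, hz_il]
      rw [hgd]
      set m := matchLen p (i - l) 0 with hm
      have hM : ∀ t, t < min m (r - i) →
          i + t < p.length ∧ p.getD (i + t) ' ' = p.getD t ' ' := by
        intro t ht
        have hw := hW (i - l + t) (by omega)
        have e : l + (i - l + t) = i + t := by omega
        rw [e] at hw
        have e3 := (matchLen_matches p (i - l) 0 t (Nat.zero_le _) (by omega)).2
        exact ⟨by omega, hw.trans e3⟩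
      rw [zExtend_eq]
      exact matchLen_eq_of_matches p i (min m (r - i)) hM
    · rw [if_neg hir, hz0 i (by omega), zExtend_eq]
  -- now push hZ through the step
  simp only [Astep]
  unfold ZInv
  dsimp only
  rw [hZ]
  set z1 := if i < r then z.set i (min (z.getD (i - l) 0) (r - i)) else z with hz1
  have hz1len : z1.length = p.length := by
    rw [hz1]; split <;> simp [hzlen]
  have hz1get : ∀ t, t ≠ i → z1.getD t 0 = z.getD t 0 := by
    intro t ht
    rw [hz1]; split
    · exact getD_set_ne _ _ _ (fun he => ht he.symm) _ _
    · rfl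
  refine ⟨by simp [hz1len], ?_, ?_, ?_, ?_, ?_, ?_, ?_⟩
  · intro t h1 h2
    by_cases hti : t = i
    · subst hti
      rw [getD_set_self _ _ (by omega) _ _]
    · rw [getD_set_ne _ _ _ (fun he => hti he.symm) _ _, hz1get t hti]
      exact hzval t h1 (by omega)
  · intro t ht
    have hti : t ≠ i := by omega
    rw [getD_set_ne _ _ _ (fun he => hti he.symm) _ _, hz1get t hti]
    exact hz0 t (by omega)
  · split
    all_goals simp
    all_goals omega
  · split
    all_goals simp
    all_goals omega
  · split
    · have : i + matchLen p i 0 ≤ p.length := matchLen_le p i 0 (by omega)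
      simpa using this
    · simpa using hrn
  · split
    · right
      refine ⟨by omega, rfl⟩
    · simpa using hwin
  · rw [Bfold_succ, Bstep]
    rw [hss]

theorem ZInv_fold (p : List Char) (hn : 1 ≤ p.length) :
    ∀ k, k ≤ p.length - 1 → ZInv p k ((List.range' 1 k).foldl (Astep p) (AInit p)) := by
  intro k
  induction k with
  | zero => intro _; exact ZInv_init p hn
  | succ k ih =>
    intro hk
    rw [List.range'_concat, List.foldl_append]
    have e : 1 + 1 * k = k + 1 := by omega
    rw [e]
    simp only [List.foldl_cons, List.foldl_nil]
    exact ZInv_step p k _ (by omega) (ih (by omega))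

theorem A_eq (pat : String) :
    calc_strong_suf pat =
      ((List.range' 1 (pat.toList.reverse.length - 1)).foldl (Astep pat.toList.reverse)
        (List.replicate pat.toList.reverse.length 0, 0, 1,
         List.replicate pat.toList.length (none : Option Int))).2.2.2 := rfl

theorem B_eq (pat : String) :
    calc_strong_suf_alt pat = Bfold pat.toList.reverse (pat.toList.reverse.length - 1) := rfl

-- ===== VERDICT (by name: the statement is the Claim_ definition above) =====
theorem calc_strong_suf_spec : Claim_equal_calc_strong_suf := by
  intro pat _
  unfold Spec_calc_strong_suf
  rw [A_eq, B_eq]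
  have e : List.replicate pat.toList.length (none : Option Int)
      = List.replicate pat.toList.reverse.length none := by rw [List.length_reverse]
  rw [e]
  set p := pat.toList.reverse with hp
  rcases Nat.eq_zero_or_pos p.length with h0 | hpos
  · simp [h0, Bfold]
  · exact ((ZInv_fold p hpos (p.length - 1) le_rfl).2.2.2.2.2.2.2)
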